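-- pv_equiv track=rewrite | github.com/preshma-m/leetcode-solutions | 3952-trionic-array-i/trionic-array-i.py | isTrionic
-- ===== SOURCE A (Python) =====
-- def isTrionic(nums):
--     n = len(nums)
--     i = 0
--
--     # 1) strictly increasing
--     while i + 1 < n and nums[i] < nums[i + 1]:
--         i += 1
--
--     # must have at least one increase
--     if i == 0:
--         return False
--
--     # 2) strictly decreasing
--     while i + 1 < n and nums[i] > nums[i + 1]:
--         i += 1
--
--     # must have at least one decrease
--     if i == 0 or i == n - 1:
--         return False
--
--     # 3) strictly increasing again
--     while i + 1 < n and nums[i] < nums[i + 1]: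
--         i += 1
--
--     # must reach end
--     return i == n - 1
-- ===== SOURCE B (Python) =====
-- def isTrionic(nums):
--     sgn = []
--     for a, b in zip(nums, nums[1:]):
--         if a == b:
--             return False
--         sgn.append(1 if a < b else -1)
--     runs = [s for k, s in enumerate(sgn) if k == 0 or sgn[k - 1] != s]
--     return runs == [1, -1, 1]
-- ===== Notes on version B (the rewrite author's own statement) =====
-- stated objective: simpler
-- what changed: Replaces the three pointer-advancing while loops and their ad-hoc boundary checks with a single pass that computes adjacent-pair signs (rejecting any equal pair) and then checks that the run-length compression of the sign list is exactly three runs in up/down/up order.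
import Mathlib
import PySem

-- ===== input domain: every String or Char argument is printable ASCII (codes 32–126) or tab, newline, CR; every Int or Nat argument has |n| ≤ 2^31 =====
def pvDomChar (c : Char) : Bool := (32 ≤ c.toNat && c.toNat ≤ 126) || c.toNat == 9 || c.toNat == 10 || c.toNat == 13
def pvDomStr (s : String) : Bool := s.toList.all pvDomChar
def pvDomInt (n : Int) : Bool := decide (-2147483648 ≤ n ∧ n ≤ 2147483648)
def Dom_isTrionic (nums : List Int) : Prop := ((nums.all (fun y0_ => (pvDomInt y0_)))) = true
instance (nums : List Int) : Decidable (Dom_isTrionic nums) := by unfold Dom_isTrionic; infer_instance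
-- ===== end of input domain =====

-- B replaces A's three while loops with one sign-list pass plus a run-length-compression check; objective: simpler.

-- ===== PORT A =====
-- the two while loops of A: advance i while i+1 < n and the comparison holds
def climbUp (nums : List Int) (i : Nat) : Nat :=
  if h : i + 1 < nums.length ∧ nums.getD i 0 < nums.getD (i + 1) 0 then
    climbUp nums (i + 1)
  else i
termination_by nums.length - i
decreasing_by omega

def climbDown (nums : List Int) (i : Nat) : Nat :=
  if h : i + 1 < nums.length ∧ nums.getD (i + 1) 0 < nums.getD i 0 then
    climbDown nums (i + 1)
  else i
termination_by nums.length - i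
decreasing_by omega

def isTrionic (nums : List Int) : Bool :=
  let n := nums.length
  let i1 := climbUp nums 0
  if i1 = 0 then false
  else
    let i2 := climbDown nums i1
    if i2 = 0 ∨ i2 = n - 1 then false
    else
      let i3 := climbUp nums i2
      decide (i3 = n - 1)

-- ===== PORT B =====
-- the for-loop over zip(nums, nums[1:]) with the early `return False` on an equal pair
def sgnList : List Int → Option (List Int)
  | a :: b :: r =>
    if a = b then none
    else
      match sgnList (b :: r) with
      | none => none
      | some s => some ((if a < b then (1 : Int) else -1) :: s)
  | _ => some []

-- the comprehension keeping sgn[k] when k == 0 or sgn[k-1] != sgn[k] (first element of each run)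
def rleF : List Int → List Int
  | [] => []
  | [a] => [a]
  | a :: b :: r => if b = a then rleF (a :: r) else a :: rleF (b :: r)

def isTrionic_alt (nums : List Int) : Bool :=
  match sgnList nums with
  | none => false
  | some sgn => decide (rleF sgn = [1, -1, 1])

-- ===== PRECONDITION & SPEC =====
def Spec_isTrionic (nums : List Int) (out : Bool) : Prop := out = isTrionic_alt nums
instance (nums : List Int) (out : Bool) : Decidable (Spec_isTrionic nums out) := by unfold Spec_isTrionic; infer_instance

-- ===== CLAIM (what is proved, stated in full; the proofs are below) =====
def Claim_equal_isTrionic : Prop := ∀ (nums : List Int), Dom_isTrionic nums → Spec_isTrionic nums (isTrionic nums)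

-- ===== LEMMAS AND PROOFS =====

-- total sign list (0 marks an equal adjacent pair)
def sg : List Int → List Int
  | a :: b :: r => (if a = b then 0 else if a < b then 1 else -1) :: sg (b :: r)
  | _ => []

-- decomposition predicate shared by both characterizations
def Tri (s : List Int) : Prop :=
  ∃ a b c, 1 ≤ a ∧ 1 ≤ b ∧ 1 ≤ c ∧
    s = List.replicate a 1 ++ List.replicate b (-1) ++ List.replicate c 1

theorem sgnList_eq (nums : List Int) :
    sgnList nums = if (0 : Int) ∈ sg nums then none else some (sg nums) := by
  fun_induction sgnList nums with
  | case1 x y => simp [sg]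
  | case2 a b r hab hnone ih =>
    rw [hnone] at ih
    simp only [sg, if_neg hab, List.mem_cons]
    split_ifs at ih with h0
    simp [h0]
  | case3 a b r hab s hsome ih =>
    rw [hsome] at ih
    simp only [sg, if_neg hab, List.mem_cons]
    split_ifs at ih with h0
    simp only [Option.some.injEq] at ih
    have hne : ¬ ((0:Int) = if a < b then 1 else -1) := by split_ifs <;> simp
    simp [hne, h0, ih]
  | case4 t h =>
    match t, h with
    | [], _ => simp [sg]
    | [a], _ => simp [sg]
    | a :: b :: r, h => exact absurd rfl (h a b r)

theorem sg_length (nums : List Int) : (sg nums).length = nums.length - 1 := by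
  fun_induction sg nums with
  | case1 a b r ih => simp [ih]
  | case2 t h =>
    match t, h with
    | [], _ => simp [sg]
    | [a], _ => simp [sg]
    | a :: b :: r, h => exact absurd rfl (h a b r)

theorem sg_tail (nums : List Int) : sg nums.tail = (sg nums).tail := by
  match nums with
  | [] => simp [sg]
  | [a] => simp [sg]
  | a :: b :: r => simp [sg]

theorem sg_drop (k : Nat) (nums : List Int) : sg (nums.drop k) = (sg nums).drop k := by
  induction k generalizing nums with
  | zero => simp
  | succ k ih =>
    rw [← List.drop_drop, ← List.drop_drop, List.drop_one, List.drop_one, sg_tail, ih]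

theorem sg_small (l : List Int) (h : l.length ≤ 1) : sg l = [] := by
  match l with
  | [] => simp [sg]
  | [a] => simp [sg]
  | a :: b :: r => simp at h

theorem drop_two (nums : List Int) (i : Nat) (h : i + 1 < nums.length) :
    nums.drop i = nums[i] :: nums[i+1] :: nums.drop (i+2) := by
  rw [List.drop_eq_getElem_cons (by omega)]
  congr 1
  rw [List.drop_eq_getElem_cons (by omega)]

theorem climbUp_char (nums : List Int) (i : Nat) :
    climbUp nums i = i + ((sg (nums.drop i)).takeWhile (· == (1 : Int))).length := by
  fun_induction climbUp nums i with
  | case1 i h ih =>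
    obtain ⟨h1, h2⟩ := h
    rw [drop_two nums i h1]
    rw [List.getD_eq_getElem _ _ (by omega), List.getD_eq_getElem _ _ (by omega)] at h2
    have hne : nums[i] ≠ nums[i+1] := ne_of_lt h2
    simp only [sg, if_neg hne, if_pos h2]
    have : nums.drop (i+1) = nums[i+1] :: nums.drop (i+2) := List.drop_eq_getElem_cons (by omega)
    rw [this] at ih
    simp only [List.takeWhile_cons]
    simp only [BEq.rfl, if_true, List.length_cons]
    omega
  | case2 i h =>
    by_cases h1 : i + 1 < nums.length
    · have h2 : ¬ nums.getD i 0 < nums.getD (i + 1) 0 := fun hl => h ⟨h1, hl⟩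
      rw [List.getD_eq_getElem _ _ (by omega), List.getD_eq_getElem _ _ (by omega)] at h2
      rw [drop_two nums i h1]
      have hne : ((if nums[i] = nums[i+1] then (0:Int) else if nums[i] < nums[i+1] then 1 else -1) == (1:Int)) = false := by
        split_ifs <;> simp_all
      simp only [sg, List.takeWhile_cons, hne]
      simp
    · have : (nums.drop i).length ≤ 1 := by simp; omega
      rw [sg_small _ this]
      simp

theorem climbDown_char (nums : List Int) (i : Nat) :
    climbDown nums i = i + ((sg (nums.drop i)).takeWhile (· == (-1 : Int))).length := by
  fun_induction climbDown nums i with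
  | case1 i h ih =>
    obtain ⟨h1, h2⟩ := h
    rw [drop_two nums i h1]
    rw [List.getD_eq_getElem _ _ (by omega), List.getD_eq_getElem _ _ (by omega)] at h2
    have hne : nums[i] ≠ nums[i+1] := ne_of_gt h2
    simp only [sg, if_neg hne, if_neg (not_lt_of_gt h2)]
    have : nums.drop (i+1) = nums[i+1] :: nums.drop (i+2) := List.drop_eq_getElem_cons (by omega)
    rw [this] at ih
    simp only [List.takeWhile_cons]
    simp only [BEq.rfl, if_true, List.length_cons]
    omega
  | case2 i h =>
    by_cases h1 : i + 1 < nums.length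
    · have h2 : ¬ nums.getD (i + 1) 0 < nums.getD i 0 := fun hl => h ⟨h1, hl⟩
      rw [List.getD_eq_getElem _ _ (by omega), List.getD_eq_getElem _ _ (by omega)] at h2
      rw [drop_two nums i h1]
      have hne : ((if nums[i] = nums[i+1] then (0:Int) else if nums[i] < nums[i+1] then 1 else -1) == (-1:Int)) = false := by
        split_ifs with e1 e2
        · simp
        · simp
        · exact absurd (by omega) h2
      simp only [sg, List.takeWhile_cons, hne]
      simp
    · have : (nums.drop i).length ≤ 1 := by simp; omega
      rw [sg_small _ this]
      simp

theorem tw_rep_append (p : Int → Bool) (v : Int) (hp : p v = true) (k : Nat) (t : List Int) :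
    (List.replicate k v ++ t).takeWhile p = List.replicate k v ++ t.takeWhile p := by
  induction k with
  | zero => simp
  | succ k ih => simp [List.replicate_succ, List.takeWhile_cons, hp, ih]

theorem head?_dropWhile_false (p : Int → Bool) (l : List Int) (x : Int)
    (h : (l.dropWhile p).head? = some x) : p x = false := by
  induction l with
  | nil => simp at h
  | cons a r ih =>
    rw [List.dropWhile_cons] at h
    by_cases hp : p a
    · rw [if_pos hp] at h; exact ih h
    · rw [if_neg hp] at h
      simp only [List.head?_cons, Option.some.injEq] at h
      rw [← h]
      exact Bool.not_eq_true _ ▸ (by simpa using hp)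

theorem tw_char (s : List Int) :
    (((s.takeWhile (· == (1 : Int))).length ≠ 0 ∧
      (s.takeWhile (· == (1 : Int))).length +
        ((s.drop (s.takeWhile (· == (1 : Int))).length).takeWhile (· == (-1 : Int))).length ≠ s.length ∧
      (s.takeWhile (· == (1 : Int))).length +
        ((s.drop (s.takeWhile (· == (1 : Int))).length).takeWhile (· == (-1 : Int))).length +
        ((s.drop ((s.takeWhile (· == (1 : Int))).length +
          ((s.drop (s.takeWhile (· == (1 : Int))).length).takeWhile (· == (-1 : Int))).length)).takeWhile (· == (1 : Int))).length
        = s.length)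
     ↔ Tri s) := by
  constructor
  · rintro ⟨h1, h2, h3⟩
    set a := (s.takeWhile (· == (1 : Int))).length with hadef
    have hrep1 : s.takeWhile (· == (1 : Int)) = List.replicate a 1 :=
      List.eq_replicate_iff.2 ⟨rfl, fun x hx => by
        simpa [beq_iff_eq] using List.mem_takeWhile_imp hx⟩
    have hsplit : s = List.replicate a 1 ++ s.dropWhile (· == (1 : Int)) := by
      rw [← hrep1, List.takeWhile_append_dropWhile]
    have hdrop : s.drop a = s.dropWhile (· == (1 : Int)) := by
      conv_lhs => rw [hsplit]
      exact List.drop_left' (by simp)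
    set t1 := s.dropWhile (· == (1 : Int)) with ht1def
    rw [hdrop] at h2 h3
    set d := (t1.takeWhile (· == (-1 : Int))).length with hddef
    have hrep2 : t1.takeWhile (· == (-1 : Int)) = List.replicate d (-1) :=
      List.eq_replicate_iff.2 ⟨rfl, fun x hx => by
        simpa [beq_iff_eq] using List.mem_takeWhile_imp hx⟩
    have hsplit2 : t1 = List.replicate d (-1) ++ t1.dropWhile (· == (-1 : Int)) := by
      rw [← hrep2, List.takeWhile_append_dropWhile]
    set t2 := t1.dropWhile (· == (-1 : Int)) with ht2def
    have hdrop2 : s.drop (a + d) = t2 := by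
      rw [← List.drop_drop, hdrop]
      conv_lhs => rw [hsplit2]
      exact List.drop_left' (by simp)
    rw [hdrop2] at h3
    have hlen : s.length = a + d + t2.length := by
      conv_lhs => rw [hsplit]
      conv_lhs => rw [hsplit2]
      simp; omega
    have hc : (t2.takeWhile (· == (1 : Int))).length = t2.length := by omega
    have htw2 : t2.takeWhile (· == (1 : Int)) = t2 :=
      (List.takeWhile_prefix _).eq_of_length hc
    have hrep3 : t2 = List.replicate t2.length 1 :=
      List.eq_replicate_iff.2 ⟨rfl, fun x hx => by
        have := List.takeWhile_eq_self_iff.1 htw2 x hx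
        simpa [beq_iff_eq] using this⟩
    have hcpos : 1 ≤ t2.length := by omega
    have hd : 1 ≤ d := by
      by_contra hd0
      have hd0' : d = 0 := by omega
      have ht1t2 : t1 = t2 := by
        conv_lhs => rw [hsplit2]
        simp [hd0']
      have ht2h : t2.head? = some 1 := by
        obtain ⟨k, hk⟩ : ∃ k, t2.length = k + 1 := ⟨t2.length - 1, by omega⟩
        conv_lhs => rw [hrep3, hk]
        simp [List.replicate_succ]
      have ht1h : (s.dropWhile (· == (1 : Int))).head? = some 1 := by
        rw [← ht1def, ht1t2]; exact ht2h
      have := head?_dropWhile_false _ _ _ ht1h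
      simp at this
    refine ⟨a, d, t2.length, by omega, hd, hcpos, ?_⟩
    conv_lhs => rw [hsplit]
    conv_lhs => rw [hsplit2]
    rw [← hrep3, List.append_assoc]
  · rintro ⟨a, b, c, ha, hb, hc, rfl⟩
    obtain ⟨b', rfl⟩ : ∃ b', b = b' + 1 := ⟨b - 1, by omega⟩
    obtain ⟨c', rfl⟩ : ∃ c', c = c' + 1 := ⟨c - 1, by omega⟩
    have htw1 : ((List.replicate a (1:Int) ++ List.replicate (b'+1) (-1:Int) ++ List.replicate (c'+1) (1:Int)).takeWhile (· == (1 : Int))) = List.replicate a 1 := by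
      rw [List.append_assoc, tw_rep_append _ _ (by simp) a]
      simp [List.replicate_succ, List.takeWhile_cons]
    rw [htw1]
    simp only [List.length_replicate]
    have hdrop1 : (List.replicate a (1:Int) ++ List.replicate (b'+1) (-1:Int) ++ List.replicate (c'+1) (1:Int)).drop a = List.replicate (b'+1) (-1:Int) ++ List.replicate (c'+1) (1:Int) := by
      rw [List.append_assoc]
      exact List.drop_left' (by simp)
    rw [hdrop1]
    have htw2 : ((List.replicate (b'+1) (-1:Int) ++ List.replicate (c'+1) (1:Int)).takeWhile (· == (-1 : Int))) = List.replicate (b'+1) (-1:Int) := by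
      rw [tw_rep_append _ _ (by simp) (b'+1)]
      simp [List.replicate_succ, List.takeWhile_cons]
    rw [htw2]
    simp only [List.length_replicate]
    have hdrop2 : (List.replicate a (1:Int) ++ List.replicate (b'+1) (-1:Int) ++ List.replicate (c'+1) (1:Int)).drop (a + (b'+1)) = List.replicate (c'+1) (1:Int) := by
      exact List.drop_left' (by simp)
    rw [hdrop2]
    have htw3 : ((List.replicate (c'+1) (1:Int)).takeWhile (· == (1 : Int))) = List.replicate (c'+1) (1:Int) := by
      have := tw_rep_append (· == (1 : Int)) 1 (by simp) (c'+1) []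
      simpa using this
    rw [htw3]
    simp
    omega

theorem rleF_eq_nil (t : List Int) (h : rleF t = []) : t = [] := by
  fun_induction rleF t with
  | case1 => rfl
  | case2 a => simp at h
  | case3 a r ih => exact absurd (ih h) (by simp)
  | case4 a b r hba ih => simp at h

theorem rleF_rep_append (a : Nat) (v : Int) (t : List Int) (ha : 1 ≤ a)
    (ht : t.head? ≠ some v) :
    rleF (List.replicate a v ++ t) = v :: rleF t := by
  induction a with
  | zero => omega
  | succ k ih =>
    by_cases hk : 1 ≤ k
    · have hk' := ih hk
      rw [List.replicate_succ, List.cons_append]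
      obtain ⟨k', rfl⟩ : ∃ k', k = k' + 1 := ⟨k - 1, by omega⟩
      rw [List.replicate_succ, List.cons_append, rleF, if_pos rfl, ← List.cons_append,
        ← List.replicate_succ]
      exact hk'
    · have hk0 : k = 0 := by omega
      subst hk0
      simp only [List.replicate_succ, List.replicate_zero, List.cons_append, List.nil_append]
      match t, ht with
      | [], _ => simp [rleF]
      | w :: r, ht =>
        have hw : w ≠ v := by simpa using ht
        rw [rleF, if_neg hw]

theorem rleF_cons (s : List Int) (v : Int) (l : List Int) (h : rleF s = v :: l) :
    ∃ k t, 1 ≤ k ∧ s = List.replicate k v ++ t ∧ rleF t = l ∧ t.head? ≠ some v := by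
  fun_induction rleF s with
  | case1 => simp at h
  | case2 a =>
    simp only [List.cons.injEq] at h
    obtain ⟨rfl, rfl⟩ := h
    exact ⟨1, [], le_refl 1, by simp, by simp [rleF], by simp⟩
  | case3 a r ih =>
    obtain ⟨k, t, hk, hs, hrl, hh⟩ := ih h
    have hav : a = v := by
      have : (a :: r).head? = (List.replicate k v ++ t).head? := by rw [hs]
      obtain ⟨k', rfl⟩ : ∃ k', k = k' + 1 := ⟨k - 1, by omega⟩
      simpa [List.replicate_succ] using this
    subst hav
    refine ⟨k + 1, t, by omega, ?_, hrl, hh⟩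
    rw [List.replicate_succ, List.cons_append, ← hs]
  | case4 a b r hba ih =>
    simp only [List.cons.injEq] at h
    obtain ⟨rfl, hl⟩ := h
    exact ⟨1, b :: r, le_refl 1, by simp, hl, by simpa using hba⟩

theorem rleF_iff (s : List Int) : rleF s = [1, -1, 1] ↔ Tri s := by
  constructor
  · intro h
    obtain ⟨a, t1, ha, hs1, hr1, hh1⟩ := rleF_cons s 1 [-1, 1] h
    obtain ⟨b, t2, hb, hs2, hr2, hh2⟩ := rleF_cons t1 (-1) [1] hr1
    obtain ⟨c, t3, hc, hs3, hr3, hh3⟩ := rleF_cons t2 1 [] hr2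
    have ht3 : t3 = [] := rleF_eq_nil t3 hr3
    subst ht3
    refine ⟨a, b, c, ha, hb, hc, ?_⟩
    rw [hs1, hs2, hs3]
    simp
  · rintro ⟨a, b, c, ha, hb, hc, rfl⟩
    rw [List.append_assoc, rleF_rep_append a 1 _ ha (by
      obtain ⟨b', rfl⟩ : ∃ b', b = b' + 1 := ⟨b - 1, by omega⟩
      simp [List.replicate_succ])]
    rw [rleF_rep_append b (-1) _ hb (by
      obtain ⟨c', rfl⟩ : ∃ c', c = c' + 1 := ⟨c - 1, by omega⟩
      simp [List.replicate_succ])]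
    rw [show rleF (List.replicate c (1:Int)) = [1] by
      have := rleF_rep_append c 1 [] hc (by simp)
      simpa [rleF] using this]

theorem A_iff (nums : List Int) : isTrionic nums = true ↔ Tri (sg nums) := by
  rw [← tw_char (sg nums)]
  simp only [isTrionic]
  rw [climbUp_char nums 0, List.drop_zero, Nat.zero_add]
  rw [climbDown_char, sg_drop]
  rw [climbUp_char, sg_drop]
  have hl : (sg nums).length = nums.length - 1 := sg_length nums
  split_ifs with h1 h2
  · simp only [false_iff]
    rintro ⟨c1, -, -⟩
    exact c1 h1
  · simp only [false_iff]
    rintro ⟨c1, c2, -⟩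
    omega
  · rw [decide_eq_true_iff]
    push_neg at h2
    constructor
    · rintro h3
      refine ⟨h1, by omega, by omega⟩
    · rintro ⟨-, -, c3⟩
      omega

theorem B_iff (nums : List Int) : isTrionic_alt nums = true ↔ Tri (sg nums) := by
  simp only [isTrionic_alt]
  rw [sgnList_eq]
  split_ifs with h0
  · simp only [false_iff]
    rintro ⟨a, b, c, -, -, -, hs⟩
    rw [hs] at h0
    simp [List.mem_replicate] at h0
  · simp only [decide_eq_true_iff]
    exact rleF_iff (sg nums)

-- ===== VERDICT (by name: the statement is the Claim_ definition above) =====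
theorem isTrionic_spec : Claim_equal_isTrionic := by
  intro nums _
  unfold Spec_isTrionic
  rw [Bool.eq_iff_iff, A_iff, B_iff]
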